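-- pv_equiv track=rewrite | github.com/miliar/Code_Jam_Webscraper | solutions_python/Problem_155/1760.py | solve
-- ===== SOURCE A (Python) =====
-- def solve(s):
--     n = 0
--     f = 0
--     for i in range(len(s)):
--         if n < i:
--             f += i - n
--             n = i
--         n += s[i]
--     return f
-- ===== SOURCE B (Python) =====
-- def solve(s):
--     m = 0
--     for x in reversed(s[:-1]):
--         m = max(0, m + 1 - x)
--     return m
-- ===== Notes on version B (the rewrite author's own statement) =====
-- stated objective: alternative
-- what changed: Replaces A's left-to-right scan with conditional reach/refuel state (n,f) by a right-to-left pass over s[:-1] that maintains a single clamped deficit accumulator m = max(0, m + 1 - x), with no index variable, no refuel branch and no reach bookkeeping.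
import Mathlib
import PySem

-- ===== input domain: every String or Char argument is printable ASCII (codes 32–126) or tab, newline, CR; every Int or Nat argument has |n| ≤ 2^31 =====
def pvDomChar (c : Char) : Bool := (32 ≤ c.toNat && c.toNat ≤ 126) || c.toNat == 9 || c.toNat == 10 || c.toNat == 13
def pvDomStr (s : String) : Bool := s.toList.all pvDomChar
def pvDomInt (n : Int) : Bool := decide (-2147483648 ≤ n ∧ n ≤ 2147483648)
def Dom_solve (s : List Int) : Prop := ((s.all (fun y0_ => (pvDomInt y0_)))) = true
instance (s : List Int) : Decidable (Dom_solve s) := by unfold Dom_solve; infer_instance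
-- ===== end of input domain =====

-- B replaces A's conditional reach/refuel scan by a reversed pass over s[:-1]
-- maintaining one clamped deficit accumulator (alternative decomposition, same cost).

-- ===== PORT A =====
-- A: n = reach, f = fuel added; refuel branch when n < i, then advance reach by s[i].
def solve (s : List Int) : Int :=
  ((PySem.List.enumerate s).foldl (fun (st : Int × Int) p =>
      let nf : Int × Int := if st.1 < p.1 then (p.1, st.2 + (p.1 - st.1)) else (st.1, st.2)
      (nf.1 + p.2, nf.2)) (0, 0)).2

-- ===== PORT B =====
-- B: m = 0; for x in reversed(s[:-1]): m = max(0, m + 1 - x); return m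
def solve_alt (s : List Int) : Int :=
  ((PySem.List.slice s none (some (-1))).reverse).foldl (fun m x => max 0 (m + 1 - x)) 0

-- ===== PRECONDITION & SPEC =====
def Spec_solve (s : List Int) (out : Int) : Prop := out = solve_alt s
instance (s : List Int) (out : Int) : Decidable (Spec_solve s out) := by unfold Spec_solve; infer_instance

-- ===== CLAIM =====
def Claim_equal_solve : Prop := ∀ (s : List Int), Dom_solve s → Spec_solve s (solve s)

-- ===== LEMMAS AND PROOFS =====

-- Proof-only abstraction of A's loop: c = i - n (index minus reach) for the remaining list.
def auxA : List Int → Int → Int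
  | [], _ => 0
  | x :: t, c => if 0 < c then c + auxA t (1 - x) else auxA t (c + 1 - x)

-- B's pass as a foldr over the untrimmed-from-the-left list.
def runB (u : List Int) : Int := u.foldr (fun x m => max 0 (m + 1 - x)) 0

theorem runB_nonneg : ∀ u : List Int, 0 ≤ runB u := by
  intro u; cases u with
  | nil => simp [runB]
  | cons x t => simp only [runB, List.foldr_cons]; omega

-- A's fold starting at index k with state (n, f) adds exactly auxA l (k - n) to f.
theorem foldA_eq : ∀ (l : List Int) (k n f : Int),
    ((PySem.List.enumerate l k).foldl (fun (st : Int × Int) p =>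
      let nf : Int × Int := if st.1 < p.1 then (p.1, st.2 + (p.1 - st.1)) else (st.1, st.2)
      (nf.1 + p.2, nf.2)) (n, f)).2 = f + auxA l (k - n) := by
  intro l
  induction l with
  | nil => intro k n f; simp [PySem.List.enumerate_nil, auxA]
  | cons x t ih =>
    intro k n f
    rw [PySem.List.enumerate_cons, List.foldl_cons]
    by_cases h : n < k
    · simp only [if_pos h]
      rw [ih]
      have h1 : k + 1 - (k + x) = 1 - x := by ring
      have h2 : 0 < k - n := by omega
      rw [h1, auxA, if_pos h2]
      ring
    · simp only [if_neg h]
      rw [ih]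
      have h1 : k + 1 - (n + x) = (k - n) + 1 - x := by ring
      have h2 : ¬ 0 < k - n := by omega
      rw [h1, auxA, if_neg h2]

-- On a nonempty list, A's abstraction equals B's clamped right-pass (shifted by c).
theorem auxA_eq_runB : ∀ (t : List Int), t ≠ [] → ∀ c : Int,
    auxA t c = max 0 (runB t.dropLast + c) := by
  intro t
  induction t with
  | nil => intro h; exact absurd rfl h
  | cons y u ih =>
    intro _ c
    by_cases hu : u = []
    · subst hu
      simp [auxA, runB]
      split_ifs <;> omega
    · rw [List.dropLast_cons_of_ne_nil hu]
      have hr : runB (y :: u.dropLast) = max 0 (runB u.dropLast + 1 - y) := by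
        simp [runB, List.foldr_cons]
      rw [hr, auxA, ih hu (1 - y), ih hu (c + 1 - y)]
      split_ifs <;> omega

-- ===== VERDICT =====
theorem solve_spec : Claim_equal_solve := by
  intro s _
  unfold Spec_solve solve solve_alt
  rw [PySem.List.slice_to_neg_one, List.foldl_reverse, foldA_eq]
  have h0 : (0:Int) - 0 = 0 := rfl
  rw [h0]
  cases s with
  | nil => simp [auxA]
  | cons x t =>
    rw [auxA_eq_runB (x :: t) (by simp) 0]
    have := runB_nonneg (x :: t).dropLast
    simp only [runB] at *
    omega
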